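-- pv_equiv track=rewrite | github.com/JackieMaw/AdventOfCode | python/2019_IntCodeChallenge_2023/model/InputStream.py | get_intcode_from_ascii_enabled
-- ===== SOURCE A (Python) =====
-- def get_intcode_from_ascii_enabled(ascii_enabled):
--     intcode = []
--     for ascii_enabled_line in ascii_enabled:
--         ascii_enabled_line = ",".join(ascii_enabled_line)
--         for ascii_enabled_char in ascii_enabled_line:
--             intcode.append(ord(ascii_enabled_char))
--         intcode.append(10)
--     return intcode
-- ===== SOURCE B (Python) =====
-- def get_intcode_from_ascii_enabled(ascii_enabled):
--     # Recursive, string-free: emit codes directly, 44 between fields, 10 after each line.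
--     def line_codes(strs):
--         if not strs:
--             return []
--         if len(strs) == 1:
--             return [ord(c) for c in strs[0]]
--         return [ord(c) for c in strs[0]] + [44] + line_codes(strs[1:])
--     if not ascii_enabled:
--         return []
--     return line_codes(ascii_enabled[0]) + [10] + get_intcode_from_ascii_enabled(ascii_enabled[1:])
-- ===== Notes on version B (the rewrite author's own statement) =====
-- stated objective: alternative
-- what changed: B never builds or joins strings: it is a pure recursion over the structure that emits integer codes directly, inserting the separator code 44 between fields and 10 after each line, whereas A materialises each line as a comma-joined string and loops over its characters appending ords.
import Mathlib
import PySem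

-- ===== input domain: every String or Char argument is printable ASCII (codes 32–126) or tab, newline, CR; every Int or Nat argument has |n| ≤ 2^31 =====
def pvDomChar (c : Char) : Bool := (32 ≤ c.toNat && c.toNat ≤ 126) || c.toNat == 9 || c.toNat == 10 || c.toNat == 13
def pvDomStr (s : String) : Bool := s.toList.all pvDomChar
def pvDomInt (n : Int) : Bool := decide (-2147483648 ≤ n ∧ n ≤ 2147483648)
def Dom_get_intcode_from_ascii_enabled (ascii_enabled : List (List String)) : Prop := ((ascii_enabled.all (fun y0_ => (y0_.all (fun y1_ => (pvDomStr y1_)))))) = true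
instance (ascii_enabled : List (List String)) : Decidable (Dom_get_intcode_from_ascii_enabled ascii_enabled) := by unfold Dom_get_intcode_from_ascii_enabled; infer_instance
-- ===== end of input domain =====

-- B replaces A's join-then-scan with a string-free structural recursion emitting codes directly (44 between fields, 10 per line); alternative decomposition, same cost.


-- ===== PORT A =====
def get_intcode_from_ascii_enabled (ascii_enabled : List (List String)) : List Int :=
  ascii_enabled.foldl (fun intcode ascii_enabled_line =>
    let joined := PySem.Str.join "," ascii_enabled_line
    (joined.toList.foldl (fun acc ascii_enabled_char => acc ++ [(ascii_enabled_char.toNat : Int)]) intcode) ++ [10]) []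

-- ===== PORT B =====
-- codes of one line: ords of each field, 44 between fields (no strings built)
def pvLineCodes : List String → List Int
  | [] => []
  | [s] => s.toList.map (fun c => (c.toNat : Int))
  | s :: t :: rest => (s.toList.map (fun c => (c.toNat : Int))) ++ ([44] ++ pvLineCodes (t :: rest))

def get_intcode_from_ascii_enabled_alt (ascii_enabled : List (List String)) : List Int :=
  match ascii_enabled with
  | [] => []
  | line :: rest => pvLineCodes line ++ ([10] ++ get_intcode_from_ascii_enabled_alt rest)

-- ===== PRECONDITION & SPEC =====
def Spec_get_intcode_from_ascii_enabled (ascii_enabled : List (List String)) (out : List Int) : Prop := out = get_intcode_from_ascii_enabled_alt ascii_enabled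
instance (ascii_enabled : List (List String)) (out : List Int) : Decidable (Spec_get_intcode_from_ascii_enabled ascii_enabled out) := by unfold Spec_get_intcode_from_ascii_enabled; infer_instance

-- ===== CLAIM =====
def Claim_equal_get_intcode_from_ascii_enabled : Prop := ∀ (ascii_enabled : List (List String)), Dom_get_intcode_from_ascii_enabled ascii_enabled → Spec_get_intcode_from_ascii_enabled ascii_enabled (get_intcode_from_ascii_enabled ascii_enabled)

-- ===== LEMMAS AND PROOFS =====

-- A's inner character loop is an append of the mapped codes.
theorem pv_inner_foldl (cs : List Char) (acc : List Int) :
    cs.foldl (fun acc c => acc ++ [(c.toNat : Int)]) acc = acc ++ cs.map (fun c => (c.toNat : Int)) := by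
  induction cs generalizing acc with
  | nil => simp
  | cons c cs ih => simp [List.foldl, ih]

-- the codes of the comma-join of a line are exactly B's pvLineCodes
theorem pv_join_codes (line : List String) :
    (PySem.Str.join "," line).toList.map (fun c => (c.toNat : Int)) = pvLineCodes line := by
  induction line with
  | nil => simp [PySem.Str.join, PySem.Chars.join_nil, pvLineCodes]
  | cons s rest ih =>
    cases rest with
    | nil =>
      simp [PySem.Str.join, PySem.Chars.join_singleton, pvLineCodes]
    | cons t rest' =>
      have h : (PySem.Str.join "," (s :: t :: rest')).toList
          = s.toList ++ (",".toList ++ (PySem.Str.join "," (t :: rest')).toList) := by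
        simp [PySem.Str.join, PySem.Chars.join_cons_cons]
      rw [show pvLineCodes (s :: t :: rest')
            = (s.toList.map (fun c => (c.toNat : Int))) ++ ([44] ++ pvLineCodes (t :: rest')) from rfl,
          ← ih, h]
      simp [List.map_append]

theorem pv_outer_foldl (l : List (List String)) (acc : List Int) :
    l.foldl (fun intcode line =>
      ((PySem.Str.join "," line).toList.foldl (fun a c => a ++ [(c.toNat : Int)]) intcode) ++ [10]) acc
    = acc ++ get_intcode_from_ascii_enabled_alt l := by
  induction l generalizing acc with
  | nil => simp [get_intcode_from_ascii_enabled_alt]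
  | cons line rest ih =>
    rw [List.foldl_cons, pv_inner_foldl, ih, pv_join_codes]
    simp [get_intcode_from_ascii_enabled_alt]

-- ===== VERDICT =====
theorem get_intcode_from_ascii_enabled_spec : Claim_equal_get_intcode_from_ascii_enabled := by
  intro l _
  unfold Spec_get_intcode_from_ascii_enabled get_intcode_from_ascii_enabled
  rw [pv_outer_foldl, List.nil_append]
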